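-- pv_equiv track=rewrite | github.com/SuperInstance/flux-stdlib | stdlib.py | _print_int_fn
-- ===== SOURCE A (Python) =====
-- def _print_int_fn(regs, mem):
--     """Print int: R0=value -> formats as decimal string at R4 base. R2=digit count."""
--     val = regs.get(0, 0)
--     base = regs.get(4, 0) & 0xFFFF
--     negative = val < 0
--     val = abs(val)
--     digits = []
--     if val == 0:
--         digits = [0x30]  # '0'
--     else:
--         while val > 0:
--             digits.append(0x30 + (val % 10))
--             val //= 10
--     digits.reverse()
--     if negative:
--         digits = [0x2D] + digits  # '-'
--     digits.append(0x00)  # null terminator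
--     for i, d in enumerate(digits):
--         if base + i < len(mem):
--             mem[base + i] = d
--     regs_out = dict(regs)
--     regs_out[2] = len(digits) - 1  # exclude null
--     return regs_out, mem
-- ===== SOURCE B (Python) =====
-- def _print_int_fn(regs, mem):
--     """Print int: R0=value -> formats as decimal string at R4 base. R2=digit count.
--
--     B: digits come from str(abs(val)) instead of a divide-by-10 loop + reverse,
--     and mem is rebuilt by a bounded comprehension instead of in-place writes
--     (A mutates mem in place; return values are identical)."""
--     val = regs.get(0, 0)
--     base = regs.get(4, 0) & 0xFFFF
--     digits = ([0x2D] if val < 0 else []) + [ord(c) for c in str(abs(val))] + [0x00]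
--     mem = [digits[j - base] if base <= j < base + len(digits) else m
--            for j, m in enumerate(mem)]
--     regs_out = dict(regs)
--     regs_out[2] = len(digits) - 1
--     return regs_out, mem
-- ===== Notes on version B (the rewrite author's own statement) =====
-- stated objective: idiomatic
-- what changed: B obtains the decimal digits in one shot via str(abs(val)) (no divide-by-10 loop, no reverse) and rebuilds mem with a single bounded comprehension instead of A's in-place indexed write loop; A mutates mem in place, B does not (return values identical).
import Mathlib
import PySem

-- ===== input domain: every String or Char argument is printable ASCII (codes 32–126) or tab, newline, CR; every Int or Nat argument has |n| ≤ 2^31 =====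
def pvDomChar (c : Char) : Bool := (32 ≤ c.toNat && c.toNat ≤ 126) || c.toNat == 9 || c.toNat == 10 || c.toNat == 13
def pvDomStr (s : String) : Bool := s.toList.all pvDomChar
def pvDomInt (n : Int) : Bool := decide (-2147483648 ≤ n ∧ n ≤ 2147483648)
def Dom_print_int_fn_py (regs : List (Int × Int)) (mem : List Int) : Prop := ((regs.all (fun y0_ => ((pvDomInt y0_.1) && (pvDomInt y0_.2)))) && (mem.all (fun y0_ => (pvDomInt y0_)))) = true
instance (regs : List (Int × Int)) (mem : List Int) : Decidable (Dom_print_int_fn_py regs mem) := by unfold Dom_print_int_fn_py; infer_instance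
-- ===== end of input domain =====

-- B formats the digits with str() and rebuilds mem by a bounded comprehension instead of
-- A's divide-by-10 loop + reverse + in-place write loop (A mutates mem; return values equal).

-- ===== PORT A =====
-- A's `while val > 0: digits.append(0x30 + val % 10); val //= 10` loop
def printIntLoopA (v : Int) (acc : List Int) : List Int :=
  if _h : v > 0 then
    printIntLoopA (PySem.Int.floordiv v 10) (acc ++ [0x30 + PySem.Int.mod v 10])
  else acc
termination_by v.toNat
decreasing_by
  rw [PySem.Int.floordiv_eq_ediv_of_pos (by omega)]
  omega

def print_int_fn_py (regs : List (Int × Int)) (mem : List Int) : (List (Int × Int)) × List Int :=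
  let val := (PySem.Dict.mk regs).getD 0 0
  let base := PySem.Int.band ((PySem.Dict.mk regs).getD 4 0) 0xFFFF
  let negative := val < 0
  let v := |val|
  let digits1 := if v = 0 then [(0x30 : Int)] else (printIntLoopA v []).reverse
  let digits2 := if negative then [(0x2D : Int)] ++ digits1 else digits1
  let digits := digits2 ++ [(0x00 : Int)]
  let mem' := (PySem.List.enumerate digits).foldl
    (fun m p => if base + p.1 < (m.length : Int) then m.set (base + p.1).toNat p.2 else m) mem
  let regsOut := (PySem.Dict.mk regs).insert 2 ((digits.length : Int) - 1)
  (regsOut.items, mem')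

-- ===== PORT B =====
def print_int_fn_py_alt (regs : List (Int × Int)) (mem : List Int) : (List (Int × Int)) × List Int :=
  let val := (PySem.Dict.mk regs).getD 0 0
  let base := PySem.Int.band ((PySem.Dict.mk regs).getD 4 0) 0xFFFF
  let digits := (if val < 0 then [(0x2D : Int)] else [])
      ++ (PySem.Int.toStr |val|).toList.map (fun c => (c.toNat : Int)) ++ [(0x00 : Int)]
  -- digits[j - base]: the guard proves the index in range, so the pyGetD default is never used
  let mem' := (PySem.List.enumerate mem).map (fun q =>
    if base ≤ q.1 ∧ q.1 < base + (digits.length : Int) then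
      PySem.List.pyGetD digits (q.1 - base) q.2 else q.2)
  let regsOut := (PySem.Dict.mk regs).insert 2 ((digits.length : Int) - 1)
  (regsOut.items, mem')

-- ===== PRECONDITION & SPEC =====
def Spec_print_int_fn_py (regs : List (Int × Int)) (mem : List Int) (out : (List (Int × Int)) × List Int) : Prop := out = print_int_fn_py_alt regs mem
instance (regs : List (Int × Int)) (mem : List Int) (out : (List (Int × Int)) × List Int) : Decidable (Spec_print_int_fn_py regs mem out) := by unfold Spec_print_int_fn_py; infer_instance

-- ===== CLAIM (what is proved, stated in full; the proofs are below) =====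
def Claim_equal_print_int_fn_py : Prop := ∀ (regs : List (Int × Int)) (mem : List Int), Dom_print_int_fn_py regs mem → Spec_print_int_fn_py regs mem (print_int_fn_py regs mem)

-- ===== LEMMAS AND PROOFS =====

-- little-endian decimal digit codes, as A's loop produces them
def littleE (n : Nat) : List Int :=
  if n = 0 then [] else (0x30 + ((n % 10 : Nat) : Int)) :: littleE (n / 10)
decreasing_by exact Nat.div_lt_self (Nat.pos_of_ne_zero (by assumption)) (by omega)

-- big-endian decimal digit characters, as Nat.toDigits produces them
def charE (n : Nat) : List Char :=
  if n < 10 then [Nat.digitChar (n % 10)] else charE (n / 10) ++ [Nat.digitChar (n % 10)]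
decreasing_by exact Nat.div_lt_self (by omega) (by omega)

lemma digitChar_ord (d : Nat) (h : d < 10) : ((Nat.digitChar d).toNat : Int) = 0x30 + d := by
  interval_cases d <;> decide

lemma loopA_eq_littleE (n : Nat) : ∀ acc : List Int, printIntLoopA (n : Int) acc = acc ++ littleE n := by
  induction n using Nat.strong_induction_on with
  | _ n ih =>
    intro acc
    rw [printIntLoopA, littleE]
    by_cases h0 : n = 0
    · simp [h0]
    · have hpos : (n : Int) > 0 := by exact_mod_cast Nat.pos_of_ne_zero h0
      rw [dif_pos hpos, if_neg h0]
      rw [show ((10 : Int)) = ((10 : Nat) : Int) by norm_num,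
        PySem.Int.floordiv_natCast, PySem.Int.mod_natCast]
      rw [ih (n / 10) (Nat.div_lt_self (Nat.pos_of_ne_zero h0) (by omega))]
      simp

lemma toDigitsCore_eq_charE (n : Nat) : ∀ (fuel : Nat) (ds : List Char), n < fuel →
    Nat.toDigitsCore 10 fuel n ds = charE n ++ ds := by
  induction n using Nat.strong_induction_on with
  | _ n ih =>
    intro fuel ds hf
    match fuel with
    | 0 => omega
    | fuel + 1 =>
      rw [Nat.toDigitsCore, charE]
      by_cases h : n / 10 = 0
      · have : n < 10 := by omega
        simp [h, this]
      · have hlt : n / 10 < n := Nat.div_lt_self (by omega) (by omega)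
        rw [if_neg h, if_neg (by omega : ¬ n < 10)]
        rw [ih (n / 10) hlt fuel _ (by omega)]
        simp

lemma littleE_reverse (n : Nat) (h : n ≠ 0) :
    (littleE n).reverse = (charE n).map (fun c => (c.toNat : Int)) := by
  induction n using Nat.strong_induction_on with
  | _ n ih =>
    rw [littleE, if_neg h, charE]
    by_cases h10 : n < 10
    · have : n / 10 = 0 := by omega
      rw [this]
      simp [littleE, h10, digitChar_ord (n % 10) (by omega)]
    · have hlt : n / 10 < n := Nat.div_lt_self (by omega) (by omega)
      rw [if_neg h10]
      simp [ih (n / 10) hlt (by omega), digitChar_ord (n % 10) (by omega)]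

-- A's digit core equals B's `str()`-derived digit codes, for nonnegative values
lemma core_eq_str (m : Int) (hm : 0 ≤ m) :
    (if m = 0 then [(0x30 : Int)] else (printIntLoopA m []).reverse)
      = (PySem.Int.toStr m).toList.map (fun c => (c.toNat : Int)) := by
  rw [PySem.Int.toList_toStr, PySem.Int.toChars]
  rw [if_neg (by omega : ¬ m < 0)]
  obtain ⟨k, rfl⟩ := Int.eq_ofNat_of_zero_le hm
  rw [Int.toNat_natCast]
  by_cases h0 : k = 0
  · subst h0; decide
  · rw [if_neg (by exact_mod_cast h0)]
    rw [loopA_eq_littleE, List.nil_append, littleE_reverse k h0]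
    rw [Nat.toDigits, toDigitsCore_eq_charE k (k + 1) [] (by omega)]
    simp

-- writing digits into mem, Nat-indexed (A's write loop, reshaped)
def overwrite (m : List Int) (b : Nat) : List Int → List Int
  | [] => m
  | d :: ds => overwrite (if b < m.length then m.set b d else m) (b + 1) ds

lemma length_overwrite (ds : List Int) : ∀ (m : List Int) (b : Nat),
    (overwrite m b ds).length = m.length := by
  induction ds with
  | nil => intro m b; rfl
  | cons d ds ih =>
    intro m b
    rw [overwrite, ih]
    split <;> simp

lemma getElem_overwrite (ds : List Int) : ∀ (m : List Int) (b j : Nat) (hj : j < m.length)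
    (hj' : j < (overwrite m b ds).length),
    (overwrite m b ds)[j] =
      if h : b ≤ j ∧ j < b + ds.length then ds[j - b]'(by omega) else m[j] := by
  induction ds with
  | nil => intro m b j hj hj'; simp [overwrite]
  | cons d ds ih =>
    intro m b j hj hj'
    simp only [overwrite] at hj' ⊢
    rw [ih _ (b + 1) j (by split <;> simpa) (by simpa using hj')]
    by_cases hbj : b + 1 ≤ j ∧ j < b + 1 + ds.length
    · rw [dif_pos hbj, dif_pos (by simp only [List.length_cons]; omega)]
      have : j - b = (j - (b + 1)) + 1 := by omega
      simp [this]
    · rw [dif_neg hbj]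
      by_cases hb : b ≤ j ∧ j < b + (d :: ds).length
      · have hjb : j = b := by simp only [List.length_cons] at hb; omega
        subst hjb
        rw [dif_pos hb]
        simp [hj]
      · rw [dif_neg hb]
        have hne : b ≠ j := by
          intro hjb; subst hjb; simp only [List.length_cons] at hb; omega
        split
        · rw [List.getElem_set_ne hne]
        · rfl

-- A's foldl over enumerate equals the Nat-indexed overwrite
lemma foldl_enumerate_eq_overwrite (ds : List Int) (bn : Nat) : ∀ (m : List Int) (i0 : Nat),
    (PySem.List.enumerate ds (i0 : Int)).foldl
      (fun m p => if (bn : Int) + p.1 < (m.length : Int) then m.set ((bn : Int) + p.1).toNat p.2 else m) m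
    = overwrite m (bn + i0) ds := by
  induction ds with
  | nil => intro m i0; simp [PySem.List.enumerate, overwrite]
  | cons d ds ih =>
    intro m i0
    rw [PySem.List.enumerate_cons, List.foldl_cons]
    have hcast : ((i0 : Int) + 1) = ((i0 + 1 : Nat) : Int) := by push_cast; ring
    rw [hcast, ih]
    have harith : ((bn : Int) + (i0 : Int)).toNat = bn + i0 := by omega
    have : bn + (i0 + 1) = (bn + i0) + 1 := by omega
    rw [this]
    simp only [overwrite, harith]
    congr 1
    split_ifs with h1 h2 h2 <;> first | rfl | omega

-- the two mem computations agree
lemma mem_write_eq (digits mem : List Int) (base : Int) (hb : 0 ≤ base) :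
    (PySem.List.enumerate digits).foldl
      (fun m p => if base + p.1 < (m.length : Int) then m.set (base + p.1).toNat p.2 else m) mem
    = (PySem.List.enumerate mem).map (fun q =>
        if base ≤ q.1 ∧ q.1 < base + (digits.length : Int) then
          PySem.List.pyGetD digits (q.1 - base) q.2 else q.2) := by
  obtain ⟨bn, rfl⟩ := Int.eq_ofNat_of_zero_le hb
  have h0 : ((0 : Int)) = ((0 : Nat) : Int) := rfl
  rw [show (PySem.List.enumerate digits) = (PySem.List.enumerate digits ((0 : Nat) : Int)) from rfl,
    foldl_enumerate_eq_overwrite]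
  apply List.ext_getElem
  · rw [length_overwrite, List.length_map, PySem.List.length_enumerate]
  · intro j hj hj'
    rw [length_overwrite] at hj
    rw [List.getElem_map, PySem.List.getElem_enumerate]
    rw [getElem_overwrite digits mem (bn + 0) j hj (by rwa [length_overwrite])]
    by_cases hc : bn + 0 ≤ j ∧ j < bn + 0 + digits.length
    · rw [dif_pos hc]
      rw [if_pos (by constructor <;> omega)]
      have : ((0 : Int) + (j : Int) - (bn : Int)) = ((j - bn : Nat) : Int) := by omega
      rw [this, PySem.List.pyGetD_natCast]
      rw [List.getD_eq_getElem _ _ (by omega)]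
      simp
    · rw [dif_neg hc, if_neg (by omega)]

-- ===== VERDICT (by name: the statement is the Claim_ definition above) =====
theorem print_int_fn_py_spec : Claim_equal_print_int_fn_py := by
  intro regs mem _
  show print_int_fn_py regs mem = print_int_fn_py_alt regs mem
  simp only [print_int_fn_py, print_int_fn_py_alt]
  set val := (PySem.Dict.mk regs).getD 0 0 with hval
  set base := PySem.Int.band ((PySem.Dict.mk regs).getD 4 0) 0xFFFF with hbase
  have hb : 0 ≤ base := by
    rw [hbase, PySem.Int.band_comm]
    exact PySem.Int.band_nonneg_of_nonneg_left _ (by norm_num)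
  have hdig :
      ((if val < 0 then [(0x2D : Int)] ++ (if |val| = 0 then [(0x30 : Int)] else (printIntLoopA |val| []).reverse)
        else (if |val| = 0 then [(0x30 : Int)] else (printIntLoopA |val| []).reverse)) ++ [(0x00 : Int)])
      = (if val < 0 then [(0x2D : Int)] else [])
        ++ (PySem.Int.toStr |val|).toList.map (fun c => (c.toNat : Int)) ++ [(0x00 : Int)] := by
    rw [core_eq_str |val| (abs_nonneg val)]
    by_cases hneg : val < 0 <;> simp [hneg]
  rw [hdig]
  rw [mem_write_eq _ mem base hb]
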